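-- pv_equiv track=rewrite | github.com/ggogoeun-hub/DLThon | src/generate/generate_normal_data_v2_1.py | pick_100
-- ===== SOURCE A (Python) =====
-- def pick_100(src):
--     """Select exactly 100 unique conversations."""
--     if len(src) >= 100:
--         return src[:100]
--     # If not enough, duplicate with different seeds
--     result = list(src)
--     i = 0
--     while len(result) < 100:
--         result.append(src[i % len(src)])
--         i += 1
--     return result[:100]
-- ===== SOURCE B (Python) =====
-- def pick_100(src):
--     """Select exactly 100 unique conversations."""
--     if len(src) >= 100:
--         return src[:100]
--     reps = 100 // len(src) + 1
--     return (src * reps)[:100]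
-- ===== Notes on version B (the rewrite author's own statement) =====
-- stated objective: simpler
-- what changed: The incremental while-loop that appends src[i % len(src)] one element at a time is replaced by closed-form list replication: (src * (100 // len(src) + 1))[:100].
import Mathlib
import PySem

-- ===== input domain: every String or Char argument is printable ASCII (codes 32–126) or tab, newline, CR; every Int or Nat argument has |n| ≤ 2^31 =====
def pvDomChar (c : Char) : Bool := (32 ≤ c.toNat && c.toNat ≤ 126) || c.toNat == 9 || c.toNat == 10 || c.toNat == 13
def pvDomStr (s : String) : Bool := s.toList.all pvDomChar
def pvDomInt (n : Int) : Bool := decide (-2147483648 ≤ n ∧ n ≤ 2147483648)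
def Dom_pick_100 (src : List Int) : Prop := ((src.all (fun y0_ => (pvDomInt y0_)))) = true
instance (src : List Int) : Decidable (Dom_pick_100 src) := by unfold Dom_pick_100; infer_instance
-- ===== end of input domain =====

-- B replaces A's element-by-element padding while-loop with closed-form list replication; objective: simpler.

-- ===== PORT A =====
-- the while-loop: while len(result) < 100: result.append(src[i % len(src)]); i += 1
def pick100Loop (src : List Int) (result : List Int) (i : Nat) : List Int :=
  if _h : result.length < 100 then
    pick100Loop src (result ++ [PySem.List.pyGetD src ((i % src.length : Nat) : Int) 0]) (i + 1)
  else result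
termination_by 100 - result.length
decreasing_by simp; omega

def pick_100 (src : List Int) : List Int :=
  if 100 ≤ src.length then
    PySem.List.slice src none (some 100)
  else
    PySem.List.slice (pick100Loop src src 0) none (some 100)

-- ===== PORT B =====
def pick_100_alt (src : List Int) : List Int :=
  if 100 ≤ src.length then
    PySem.List.slice src none (some 100)
  else
    PySem.List.slice ((List.replicate (100 / src.length + 1) src).flatten) none (some 100)

-- ===== PRECONDITION & SPEC =====
-- Pre_ excludes only the empty list, on which A raises ZeroDivisionError (i % len(src) with len 0).
def Pre_pick_100 (src : List Int) : Prop := src ≠ []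
instance (src : List Int) : Decidable (Pre_pick_100 src) := by unfold Pre_pick_100; infer_instance
def pvWitness_pick_100 : List Int := [1, 2, 3]

def Spec_pick_100 (src : List Int) (out : List Int) : Prop := out = pick_100_alt src
instance (src : List Int) (out : List Int) : Decidable (Spec_pick_100 src out) := by unfold Spec_pick_100; infer_instance

-- ===== CLAIM (what is proved, stated in full; the proofs are below) =====
def Claim_equal_pick_100 : Prop := ∀ (src : List Int), Dom_pick_100 src → Pre_pick_100 src → Spec_pick_100 src (pick_100 src)

-- ===== LEMMAS AND PROOFS =====

theorem slice_to_100 (xs : List Int) : PySem.List.slice xs none (some 100) = xs.take 100 := by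
  have h := PySem.List.slice_to_natCast xs 100
  norm_num at h
  exact h

theorem len_flat_rep (src : List Int) (m : Nat) :
    ((List.replicate m src).flatten).length = m * src.length := by
  induction m with
  | zero => simp
  | succ m ih => rw [List.replicate_succ, List.flatten_cons, List.length_append, ih]; ring

-- elements of a flattened replicate are a cyclic repetition of src
theorem get_flat_rep (src : List Int) (hn : 0 < src.length) (m k : Nat)
    (hk : k < m * src.length) :
    ((List.replicate m src).flatten)[k]? = src[k % src.length]? := by
  induction m generalizing k with
  | zero => omega
  | succ m ihm =>
    rw [List.replicate_succ, List.flatten_cons]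
    rw [Nat.succ_mul] at hk
    by_cases hk2 : k < src.length
    · rw [List.getElem?_append_left hk2, Nat.mod_eq_of_lt hk2]
    · push Not at hk2
      rw [List.getElem?_append_right hk2, ihm (k - src.length) (by omega)]
      congr 1
      have h : k = (k - src.length) + src.length := by omega
      conv_rhs => rw [h]
      rw [Nat.add_mod_right]

-- take 100 of a flattened replicate does not depend on the replicate count, once it is long enough
theorem take_flatten_replicate (src : List Int) (a b : Nat) (hab : a ≤ b)
    (hlen : 100 ≤ ((List.replicate a src).flatten).length) :
    ((List.replicate b src).flatten).take 100 = ((List.replicate a src).flatten).take 100 := by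
  have h : List.replicate b src = List.replicate a src ++ List.replicate (b - a) src := by
    rw [← List.replicate_add]
    congr 1
    omega
  rw [h, List.flatten_append, List.take_append_of_le_length hlen]

theorem loop_eq (src : List Int) (hn : 0 < src.length) :
    ∀ (d i : Nat) (result : List Int),
      result = ((List.replicate 101 src).flatten).take (src.length + i) →
      src.length + i ≤ 100 → d = 100 - (src.length + i) →
      pick100Loop src result i = ((List.replicate 101 src).flatten).take 100 := by
  intro d
  have hClen : ((List.replicate 101 src).flatten).length = 101 * src.length :=
    len_flat_rep src 101
  induction d with
  | zero =>
    intro i result hres hle hd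
    have h100 : src.length + i = 100 := by omega
    have hlen : result.length = 100 := by
      rw [hres, List.length_take, hClen]
      omega
    rw [pick100Loop, dif_neg (by omega)]
    rw [h100] at hres
    exact hres
  | succ d ih =>
    intro i result hres hle hd
    have hlt : src.length + i < 100 := by omega
    have hrlen : result.length = src.length + i := by
      rw [hres, List.length_take, hClen]
      omega
    rw [pick100Loop, dif_pos (by omega)]
    have hidx : i % src.length < src.length := Nat.mod_lt _ hn
    have hget : PySem.List.pyGetD src ((i % src.length : Nat) : Int) 0
        = src[i % src.length]'hidx := by
      rw [PySem.List.pyGetD_natCast]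
      exact List.getD_eq_getElem src 0 hidx
    have hCget : ((List.replicate 101 src).flatten)[src.length + i]?
        = some (src[i % src.length]'hidx) := by
      rw [get_flat_rep src hn 101 (src.length + i) (by omega), Nat.add_mod_left,
        List.getElem?_eq_getElem hidx]
    have hstep : result ++ [PySem.List.pyGetD src ((i % src.length : Nat) : Int) 0]
        = ((List.replicate 101 src).flatten).take (src.length + (i + 1)) := by
      rw [hget, hres]
      have h : src.length + (i + 1) = (src.length + i) + 1 := by omega
      rw [h, List.take_add_one, hCget]
      rfl
    rw [hstep]
    exact ih (i + 1) _ rfl (by omega) (by omega)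

theorem pick_100_eq (src : List Int) (hne : src ≠ []) : pick_100 src = pick_100_alt src := by
  unfold pick_100 pick_100_alt
  by_cases h : 100 ≤ src.length
  · rw [if_pos h, if_pos h]
  · rw [if_neg h, if_neg h]
    have hn : 0 < src.length := List.length_pos_iff.mpr hne
    rw [slice_to_100, slice_to_100]
    have hsrc : src = ((List.replicate 101 src).flatten).take (src.length + 0) := by
      rw [Nat.add_zero, List.replicate_succ, List.flatten_cons, List.take_left]
    have hA : pick100Loop src src 0 = ((List.replicate 101 src).flatten).take 100 :=
      loop_eq src hn (100 - src.length) 0 src hsrc (by omega) (by omega)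
    rw [hA, List.take_take, Nat.min_self]
    have hreps_len : 100 ≤ ((List.replicate (100 / src.length + 1) src).flatten).length := by
      rw [len_flat_rep]
      have h1 : 100 % src.length < src.length := Nat.mod_lt _ hn
      have h2 : src.length * (100 / src.length) + 100 % src.length = 100 :=
        Nat.div_add_mod 100 src.length
      calc (100 : Nat) ≤ src.length * (100 / src.length) + src.length := by omega
        _ = (100 / src.length + 1) * src.length := by ring
    have hreps_le : 100 / src.length + 1 ≤ 101 := by
      have := Nat.div_le_self 100 src.length
      omega
    rw [take_flatten_replicate src (100 / src.length + 1) 101 hreps_le hreps_len]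

-- ===== VERDICT (by name: the statement is the Claim_ definition above) =====
theorem pick_100_spec : Claim_equal_pick_100 := by
  intro src _ hpre
  unfold Spec_pick_100
  exact pick_100_eq src hpre
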